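-- pv_equiv track=rewrite | github.com/awestover/skyspace | posts/misc/src/cryptography/pyTests/grid_codes.py | add_correction_bits
-- ===== SOURCE A (Python) =====
-- def add_correction_bits(chunk):
-- 	out = []
-- 	final = []
-- 	for r in chunk:
-- 		out.append(r+[sum(r)%2])
-- 	for col in range(0, len(out[0])):
-- 		final.append(sum([out_i[col] for out_i in out]) %2)
-- 	out.append(final)
-- 	return out
-- ===== SOURCE B (Python) =====
-- def add_correction_bits(chunk):
--     col_sums = [0] * (len(chunk[0]) + 1)
--     out = []
--     for r in chunk:
--         ext = r + [sum(r) % 2]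
--         out.append(ext)
--         for j in range(len(col_sums)):
--             col_sums[j] += ext[j]
--     out.append([c % 2 for c in col_sums])
--     return out
-- ===== Notes on version B (the rewrite author's own statement) =====
-- stated objective: alternative
-- what changed: B maintains running column sums in a single pass over the rows instead of A's second pass that re-scans all rows for every column index.
import Mathlib
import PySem

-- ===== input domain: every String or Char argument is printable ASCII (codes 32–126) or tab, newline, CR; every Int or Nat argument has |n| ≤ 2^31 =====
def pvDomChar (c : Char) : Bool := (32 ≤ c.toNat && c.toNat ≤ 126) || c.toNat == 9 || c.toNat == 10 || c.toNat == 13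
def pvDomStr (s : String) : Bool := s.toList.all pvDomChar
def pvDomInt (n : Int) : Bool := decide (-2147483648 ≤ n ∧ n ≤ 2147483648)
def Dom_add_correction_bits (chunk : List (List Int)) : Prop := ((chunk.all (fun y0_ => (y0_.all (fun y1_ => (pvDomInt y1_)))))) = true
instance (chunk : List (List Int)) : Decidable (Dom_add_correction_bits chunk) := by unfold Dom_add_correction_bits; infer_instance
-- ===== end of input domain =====

-- B maintains running column sums in one pass over the rows instead of A's second pass
-- that re-scans every row once per column index (alternative decomposition, same cost).

-- ===== PORT A =====
-- sum(r) for a list of ints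
def pvSum (r : List Int) : Int := r.foldl (· + ·) 0

def add_correction_bits (chunk : List (List Int)) : List (List Int) :=
  let out := chunk.foldl (fun acc r => acc ++ [r ++ [PySem.Int.mod (pvSum r) 2]]) []
  let final := (PySem.List.pyRange 0 ((out.headD []).length : Int) 1).foldl
      (fun acc col =>
        acc ++ [PySem.Int.mod (pvSum (out.map (fun oi => PySem.List.pyGetD oi col 0))) 2]) []
  out ++ [final]

-- ===== PORT B =====
def add_correction_bits_alt (chunk : List (List Int)) : List (List Int) :=
  let p := chunk.foldl
      (fun (p : List (List Int) × List Int) r =>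
        let ext := r ++ [PySem.Int.mod (pvSum r) 2]
        (p.1 ++ [ext], p.2.mapIdx (fun j c => c + ext.getD j 0)))
      ([], List.replicate ((chunk.headD []).length + 1) 0)
  p.1 ++ [p.2.map (fun c => PySem.Int.mod c 2)]

-- ===== PRECONDITION & SPEC =====
-- Pre_ excludes exactly the inputs where Python A raises IndexError: the empty chunk
-- (out[0]) and chunks with a row shorter than the first row (out_i[col]).
def Pre_add_correction_bits (chunk : List (List Int)) : Prop :=
  chunk ≠ [] ∧ ∀ r ∈ chunk, (chunk.headD []).length ≤ r.length
instance (chunk : List (List Int)) : Decidable (Pre_add_correction_bits chunk) := by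
  unfold Pre_add_correction_bits; infer_instance
def pvWitness_add_correction_bits : List (List Int) := [[1, 2], [3, 4]]

def Spec_add_correction_bits (chunk : List (List Int)) (out : List (List Int)) : Prop := out = add_correction_bits_alt chunk
instance (chunk : List (List Int)) (out : List (List Int)) : Decidable (Spec_add_correction_bits chunk out) := by unfold Spec_add_correction_bits; infer_instance

-- ===== CLAIM (what is proved, stated in full; the proofs are below) =====
def Claim_equal_add_correction_bits : Prop := ∀ (chunk : List (List Int)), Dom_add_correction_bits chunk → Pre_add_correction_bits chunk → Spec_add_correction_bits chunk (add_correction_bits chunk)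

-- ===== LEMMAS AND PROOFS =====

-- the extended row shared by both ports
def pvExt (r : List Int) : List Int := r ++ [PySem.Int.mod (pvSum r) 2]

theorem pvSum_cons (x : Int) (l : List Int) : pvSum (x :: l) = x + pvSum l := by
  simp [pvSum, List.foldl_cons]
  induction l generalizing x with
  | nil => simp
  | cons y l ih => simp [List.foldl_cons, ih (x + y), ih y]; ring

-- B's pair fold splits into the row map and the column-sum fold
theorem pv_pairfold (rows : List (List Int)) (acc : List (List Int)) (cs : List Int) :
    rows.foldl
      (fun (p : List (List Int) × List Int) r =>
        (p.1 ++ [pvExt r], p.2.mapIdx (fun j c => c + (pvExt r).getD j 0)))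
      (acc, cs)
    = (acc ++ rows.map pvExt,
       rows.foldl (fun cs r => cs.mapIdx (fun j c => c + (pvExt r).getD j 0)) cs) := by
  induction rows generalizing acc cs with
  | nil => simp
  | cons r rows ih => rw [List.foldl_cons, ih]; simp

-- the column-sum fold computes, at every index, the sum of that column
theorem pv_colfold (rows : List (List Int)) (cs : List Int) :
    rows.foldl (fun cs r => cs.mapIdx (fun j c => c + (pvExt r).getD j 0)) cs
    = cs.mapIdx (fun j c => c + pvSum (rows.map (fun r => (pvExt r).getD j 0))) := by
  induction rows generalizing cs with
  | nil =>
    apply List.ext_getElem <;> simp [pvSum]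
  | cons r rows ih =>
    rw [List.foldl_cons, ih]
    apply List.ext_getElem
    · simp
    · intro i h1 h2
      simp only [List.getElem_mapIdx, List.map_cons, pvSum_cons]
      ring

theorem add_correction_bits_eq (chunk : List (List Int)) (h : chunk ≠ []) :
    add_correction_bits chunk = add_correction_bits_alt chunk := by
  obtain ⟨r0, t, rfl⟩ := List.exists_cons_of_ne_nil h
  show add_correction_bits (r0 :: t) = add_correction_bits_alt (r0 :: t)
  unfold add_correction_bits add_correction_bits_alt
  rw [show (fun acc r => acc ++ [r ++ [PySem.Int.mod (pvSum r) 2]])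
        = (fun (acc : List (List Int)) r => acc ++ [pvExt r]) from rfl,
      PySem.List.foldl_append_singleton_eq_map, List.nil_append]
  rw [show (fun (p : List (List Int) × List Int) r =>
        ((p.1 ++ [r ++ [PySem.Int.mod (pvSum r) 2]] : List (List Int)),
          p.2.mapIdx (fun j c => c + (r ++ [PySem.Int.mod (pvSum r) 2]).getD j 0)))
        = (fun (p : List (List Int) × List Int) r =>
            (p.1 ++ [pvExt r], p.2.mapIdx (fun j c => c + (pvExt r).getD j 0))) from rfl]
  rw [pv_pairfold, pv_colfold]
  simp only [List.nil_append]
  congr 1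
  -- the final (parity) rows agree
  have hhead : (((r0 :: t).map pvExt).headD []) = pvExt r0 := by simp
  rw [hhead, PySem.List.foldl_append_singleton_eq_map, List.nil_append]
  have hlen : (pvExt r0).length = (((r0 :: t).headD []).length + 1) := by
    simp [pvExt]
  rw [hlen, PySem.List.pyRange_one]
  congr 1
  apply List.ext_getElem
  · simp
  · intro i h1 h2
    simp [List.getElem_mapIdx, List.map_map, Function.comp_def, pvSum_cons]

-- ===== VERDICT (by name: the statement is the Claim_ definition above) =====
theorem add_correction_bits_spec : Claim_equal_add_correction_bits := by
  intro chunk _ hpre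
  exact add_correction_bits_eq chunk hpre.1
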